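-- pv_equiv track=rewrite | github.com/bioAI0/dna | dna0.py | ascii_to_dna
-- ===== SOURCE A (Python) =====
-- def ascii_to_dna(text):
--     text = text.upper()
--     # Define the mapping of ASCII to DNA triplets
--     ascii_start = 32
--     ascii_end = 126
--     dna_triplets = [
--         'AAA', 'AAC', 'AAG', 'AAT', 'ACA', 'ACC', 'ACG', 'ACT',
--         'AGA', 'AGC', 'AGG', 'AGT', 'ATA', 'ATC', 'ATG', 'ATT',
--         'CAA', 'CAC', 'CAG', 'CAT', 'CCA', 'CCC', 'CCG', 'CCT',
--         'CGA', 'CGC', 'CGG', 'CGT', 'CTA', 'CTC', 'CTG', 'CTT',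
--         'GAA', 'GAC', 'GAG', 'GAT', 'GCA', 'GCC', 'GCG', 'GCT',
--         'GGA', 'GGC', 'GGG', 'GGT', 'GTA', 'GTC', 'GTG', 'GTT',
--         'TAA', 'TAC', 'TAG', 'TAT', 'TCA', 'TCC', 'TCG', 'TCT',
--         'TGA', 'TGC', 'TGG', 'TGT', 'TTA', 'TTC', 'TTG', 'TTT'
--     ]  # Make sure there are exactly 95 elements here.
--
--     # Convert text to ASCII values
--     ascii_values = [ord(char) for char in text]
--
--     # Translate ASCII values to DNA
--     dna_sequence = ''
--     for value in ascii_values: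
--         if ascii_start <= value <= ascii_end:  # Ensure it's a mappable ASCII value
--             index = value - ascii_start
--             dna_sequence += dna_triplets[index]
--         else:
--             raise ValueError(f"Character '{chr(value)}' at ASCII {value} out of mappable range 32-126")
--
--     return dna_sequence
-- ===== SOURCE B (Python) =====
-- def ascii_to_dna(text):
--     text = text.upper()
--     bases = 'ACGT'
--     parts = []
--     for char in text:
--         value = ord(char)
--         if not (32 <= value <= 126):
--             raise ValueError(f"Character '{chr(value)}' at ASCII {value} out of mappable range 32-126")
--         index = value - 32
--         parts.append(bases[index // 16] + bases[(index // 4) % 4] + bases[index % 4])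
--     return ''.join(parts)
-- ===== Notes on version B (the rewrite author's own statement) =====
-- stated objective: simpler
-- what changed: Replaces the hand-written 64-entry triplet lookup table by base-4 digit extraction over the four-base alphabet (base[index//16] + base[(index//4)%4] + base[index%4]) and builds the result with a list + join instead of repeated string concatenation.
import Mathlib
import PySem

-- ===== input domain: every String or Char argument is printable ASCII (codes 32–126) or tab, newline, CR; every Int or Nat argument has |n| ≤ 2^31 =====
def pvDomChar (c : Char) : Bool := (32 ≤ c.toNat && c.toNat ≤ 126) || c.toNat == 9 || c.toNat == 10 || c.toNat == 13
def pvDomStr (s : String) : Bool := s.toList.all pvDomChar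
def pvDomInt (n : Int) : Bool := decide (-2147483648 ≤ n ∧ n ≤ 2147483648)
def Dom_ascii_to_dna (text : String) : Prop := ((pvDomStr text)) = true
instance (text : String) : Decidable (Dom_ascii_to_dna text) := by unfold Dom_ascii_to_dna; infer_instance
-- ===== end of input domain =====

-- B replaces A's 64-entry lookup table by base-4 digit extraction and joins a list of triplets (objective: simpler, same cost).

-- ===== PORT A =====
-- A's local dna_triplets list (64 entries, as in the source)
def dnaTriplets : List String := [
  "AAA", "AAC", "AAG", "AAT", "ACA", "ACC", "ACG", "ACT",
  "AGA", "AGC", "AGG", "AGT", "ATA", "ATC", "ATG", "ATT",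
  "CAA", "CAC", "CAG", "CAT", "CCA", "CCC", "CCG", "CCT",
  "CGA", "CGC", "CGG", "CGT", "CTA", "CTC", "CTG", "CTT",
  "GAA", "GAC", "GAG", "GAT", "GCA", "GCC", "GCG", "GCT",
  "GGA", "GGC", "GGG", "GGT", "GTA", "GTC", "GTG", "GTT",
  "TAA", "TAC", "TAG", "TAT", "TCA", "TCC", "TCG", "TCT",
  "TGA", "TGC", "TGG", "TGT", "TTA", "TTC", "TTG", "TTT"]

-- the body of A's for-loop; the 'else' branch raises ValueError in Python (excluded by Pre_),
-- and dna_triplets[index] raises IndexError for index ≥ 64 (also excluded by Pre_): getD defaults there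
def stepA (dna : String) (v : Int) : String :=
  if 32 ≤ v ∧ v ≤ 126 then dna ++ ((PySem.List.pyGet? dnaTriplets (v - 32)).getD "")
  else dna

def ascii_to_dna (text : String) : String :=
  let t := PySem.Str.upper text
  let asciiValues : List Int := t.toList.map (fun c => (c.toNat : Int))
  asciiValues.foldl stepA ""

-- ===== PORT B =====
def basesB : List Char := "ACGT".toList

-- the body of B's for-loop; the failed range check raises ValueError and bases[d] for d ≥ 4
-- raises IndexError in Python (both excluded by Pre_): getD defaults there
def stepB (parts : List String) (c : Char) : List String :=
  let value : Int := c.toNat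
  if 32 ≤ value ∧ value ≤ 126 then
    let index := value - 32
    parts ++ [String.ofList [(PySem.List.pyGet? basesB (PySem.Int.floordiv index 16)).getD 'A',
                         (PySem.List.pyGet? basesB (PySem.Int.mod (PySem.Int.floordiv index 4) 4)).getD 'A',
                         (PySem.List.pyGet? basesB (PySem.Int.mod index 4)).getD 'A']]
  else parts

def ascii_to_dna_alt (text : String) : String :=
  let t := PySem.Str.upper text
  let parts := t.toList.foldl stepB []
  String.join parts

-- ===== PRECONDITION & SPEC =====
-- Pre_ excludes exactly the inputs on which A raises: chars below 32 or above 126 after upper()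
-- raise ValueError, and chars whose uppercased code is in 96..126 ('`', '{', '|', '}', '~')
-- raise IndexError because A's table has only 64 entries.
def Pre_ascii_to_dna (text : String) : Prop :=
  (text.toList.all (fun c => (32 ≤ c.toNat && c.toNat ≤ 95) || (97 ≤ c.toNat && c.toNat ≤ 122))) = true
instance (text : String) : Decidable (Pre_ascii_to_dna text) := by unfold Pre_ascii_to_dna; infer_instance

def pvWitness_ascii_to_dna : String := "Hi!"

def Spec_ascii_to_dna (text : String) (out : String) : Prop := out = ascii_to_dna_alt text
instance (text : String) (out : String) : Decidable (Spec_ascii_to_dna text out) := by unfold Spec_ascii_to_dna; infer_instance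

-- ===== CLAIM (what is proved, stated in full; the proofs are below) =====
def Claim_equal_ascii_to_dna : Prop := ∀ (text : String), Dom_ascii_to_dna text → Pre_ascii_to_dna text → Spec_ascii_to_dna text (ascii_to_dna text)

-- ===== LEMMAS AND PROOFS =====

-- per-character agreement of the two loop bodies' produced triplet, decided over the finite range
theorem key_nat : ∀ n : Nat, n < 96 → 32 ≤ n →
    (PySem.List.pyGet? dnaTriplets ((n : Int) - 32)).getD "" =
    String.ofList [(PySem.List.pyGet? basesB (PySem.Int.floordiv ((n : Int) - 32) 16)).getD 'A',
               (PySem.List.pyGet? basesB (PySem.Int.mod (PySem.Int.floordiv ((n : Int) - 32) 4) 4)).getD 'A',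
               (PySem.List.pyGet? basesB (PySem.Int.mod ((n : Int) - 32) 4)).getD 'A'] := by
  decide

-- uppercasing a char admitted by Pre_ lands in 32..95
theorem upperChar_range_nat : ∀ n : Nat, n < 123 →
    ((32 ≤ n ∧ n ≤ 95) ∨ (97 ≤ n ∧ n ≤ 122)) →
    32 ≤ (PySem.Chars.upperChar (Char.ofNat n)).toNat ∧ (PySem.Chars.upperChar (Char.ofNat n)).toNat ≤ 95 := by
  decide

theorem upperChar_range (c : Char)
    (h : (32 ≤ c.toNat ∧ c.toNat ≤ 95) ∨ (97 ≤ c.toNat ∧ c.toNat ≤ 122)) :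
    32 ≤ (PySem.Chars.upperChar c).toNat ∧ (PySem.Chars.upperChar c).toNat ≤ 95 := by
  have := upperChar_range_nat c.toNat (by omega) h
  rwa [Char.ofNat_toNat] at this

theorem join_append_singleton (parts : List String) (t : String) :
    String.join (parts ++ [t]) = String.join parts ++ t := by
  simp [String.join, List.foldl_append]

theorem fold_eq : ∀ (l : List Char), (∀ c ∈ l, 32 ≤ c.toNat ∧ c.toNat ≤ 95) →
    ∀ (parts : List String),
      l.foldl (fun dna c => stepA dna ((c.toNat : Int))) (String.join parts) =
      String.join (l.foldl stepB parts) := by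
  intro l
  induction l with
  | nil => intro _ parts; rfl
  | cons c cs ih =>
    intro h parts
    have hc := h c (by simp)
    have hcs : ∀ x ∈ cs, 32 ≤ x.toNat ∧ x.toNat ≤ 95 := fun x hx => h x (by simp [hx])
    have hcond : 32 ≤ ((c.toNat : Int)) ∧ ((c.toNat : Int)) ≤ 126 := by
      constructor <;> [exact_mod_cast (by omega : (32:Nat) ≤ c.toNat); exact_mod_cast (by omega : c.toNat ≤ 126)]
    simp only [List.foldl_cons, stepA, stepB, if_pos hcond]
    rw [key_nat c.toNat (by omega) (by omega), ← join_append_singleton]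
    exact ih hcs (parts ++ [_])

-- ===== VERDICT (by name: the statement is the Claim_ definition above) =====
theorem ascii_to_dna_spec : Claim_equal_ascii_to_dna := by
  intro text _hdom hpre
  unfold Pre_ascii_to_dna at hpre
  simp only [List.all_eq_true, Bool.or_eq_true, Bool.and_eq_true, decide_eq_true_eq] at hpre
  unfold Spec_ascii_to_dna ascii_to_dna ascii_to_dna_alt
  simp only [PySem.Str.toList_upper, PySem.Chars.upper]
  have hchars : ∀ c ∈ text.toList.map PySem.Chars.upperChar, 32 ≤ c.toNat ∧ c.toNat ≤ 95 := by
    intro c hc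
    rcases List.mem_map.1 hc with ⟨d, hd, rfl⟩
    exact upperChar_range d (hpre d hd)
  have := fold_eq (text.toList.map PySem.Chars.upperChar) hchars []
  simpa [List.foldl_map, String.join] using this
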